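-- pv_equiv track=rewrite | github.com/delibrately-cmyk/Instagram-comment-crawler | ig_crawler.py | shortcode_to_media_id
-- ===== SOURCE A (Python) =====
-- from typing import Any, Dict, List, Optional, Tuple
--
-- def shortcode_to_media_id(shortcode: str) -> Optional[str]:
--     alphabet = "ABCDEFGHIJKLMNOPQRSTUVWXYZabcdefghijklmnopqrstuvwxyz0123456789-_"
--     media_id = 0
--     try:
--         for char in shortcode:
--             media_id = media_id * 64 + alphabet.index(char)
--     except ValueError:
--         return None
--     return str(media_id)
-- ===== SOURCE B (Python) =====
-- def shortcode_to_media_id(shortcode):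
--     alphabet = "ABCDEFGHIJKLMNOPQRSTUVWXYZabcdefghijklmnopqrstuvwxyz0123456789-_"
--     values = {c: i for i, c in enumerate(alphabet)}
--     total = 0
--     weight = 1
--     for char in reversed(shortcode):
--         if char not in values:
--             return None
--         total += values[char] * weight
--         weight *= 64
--     return str(total)
-- ===== Notes on version B (the rewrite author's own statement) =====
-- stated objective: alternative
-- what changed: B precomputes a char-to-value dict once and sums digit*64^position over the reversed shortcode with a running weight, instead of A's Horner accumulator with a linear alphabet.index scan for every character.
import Mathlib
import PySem

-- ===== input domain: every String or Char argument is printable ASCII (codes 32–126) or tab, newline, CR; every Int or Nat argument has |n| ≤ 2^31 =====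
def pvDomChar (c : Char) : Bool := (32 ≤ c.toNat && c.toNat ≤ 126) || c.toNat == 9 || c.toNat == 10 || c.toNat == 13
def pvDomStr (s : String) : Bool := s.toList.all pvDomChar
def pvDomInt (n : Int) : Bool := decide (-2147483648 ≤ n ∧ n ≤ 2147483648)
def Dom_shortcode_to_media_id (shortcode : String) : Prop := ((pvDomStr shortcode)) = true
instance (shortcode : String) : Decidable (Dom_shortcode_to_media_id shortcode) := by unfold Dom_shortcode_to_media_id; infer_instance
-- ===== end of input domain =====

-- B replaces A's Horner loop (with a linear alphabet.index scan each step) by a precomputed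
-- char→value dict and an explicit positional sum digit*64^position over the reversed shortcode.

-- ===== PORT A =====
def pvAlphabet : List Char :=
  "ABCDEFGHIJKLMNOPQRSTUVWXYZabcdefghijklmnopqrstuvwxyz0123456789-_".toList

-- the for-loop of A; `alphabet.index(char)` for a single character is exactly the first
-- index of that char in the alphabet (exact: the needle has length 1), i.e. List.index?;
-- ValueError (char absent) propagates as `none`.
def pvGoA : List Char → Int → Option Int
  | [], acc => some acc
  | c :: rest, acc =>
    match PySem.List.index? pvAlphabet c with
    | none => none
    | some i => pvGoA rest (acc * 64 + (i : Int))

def shortcode_to_media_id (shortcode : String) : Option String :=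
  (pvGoA shortcode.toList 0).map PySem.Int.toStr

-- ===== PORT B =====
-- values = {c: i for i, c in enumerate(alphabet)}
def pvValues : PySem.Dict Char Int :=
  (PySem.List.enumerate pvAlphabet 0).foldl (fun d p => d.insert p.2 p.1) PySem.Dict.empty

-- the for-loop of B over the reversed shortcode: membership test + lookup, running weight
def pvGoB : List Char → Int → Int → Option Int
  | [], total, _ => some total
  | c :: rest, total, weight =>
    match pvValues.get? c with
    | none => none
    | some v => pvGoB rest (total + v * weight) (weight * 64)

def shortcode_to_media_id_alt (shortcode : String) : Option String :=
  (pvGoB shortcode.toList.reverse 0 1).map PySem.Int.toStr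

-- ===== PRECONDITION & SPEC =====
def Spec_shortcode_to_media_id (shortcode : String) (out : Option String) : Prop := out = shortcode_to_media_id_alt shortcode
instance (shortcode : String) (out : Option String) : Decidable (Spec_shortcode_to_media_id shortcode out) := by unfold Spec_shortcode_to_media_id; infer_instance

-- ===== CLAIM (what is proved, stated in full; the proofs are below) =====
def Claim_equal_shortcode_to_media_id : Prop := ∀ (shortcode : String), Dom_shortcode_to_media_id shortcode → Spec_shortcode_to_media_id shortcode (shortcode_to_media_id shortcode)

-- ===== LEMMAS AND PROOFS =====
set_option maxRecDepth 100000

-- the dict built by the comprehension looks keys up exactly as `alphabet.index` does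
theorem pv_build_get (l : List Char) (hl : l.Nodup) (c : Char) :
    ((PySem.List.enumerate l 0).foldl (fun d p => d.insert p.2 p.1) PySem.Dict.empty).get? c
      = (PySem.List.index? l c).map (fun n => (n : Int)) := by
  induction l using List.reverseRecOn with
  | nil => simp [PySem.List.enumerate, PySem.Dict.get?_empty, PySem.List.index?]
  | append_singleton xs x ih =>
    have hxs : xs.Nodup := (List.nodup_append.mp hl).1
    have hx : x ∉ xs := by
      intro hmem
      exact (List.nodup_append.mp hl).2.2 x hmem x (List.mem_singleton_self x) rfl
    rw [PySem.List.enumerate_append]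
    simp only [List.foldl_append, PySem.List.enumerate_cons, PySem.List.enumerate_nil,
      List.foldl_cons, List.foldl_nil]
    rw [PySem.Dict.get?_insert]
    by_cases hcx : c = x
    · subst hcx
      rw [if_pos rfl, PySem.List.index?_append_singleton_self xs _ hx]
      simp
    · rw [if_neg hcx, ih hxs]
      by_cases hcm : c ∈ xs
      · rw [PySem.List.index?_append_of_mem _ hcm]
      · have h1 : PySem.List.index? xs c = none := (PySem.List.index?_eq_none_iff xs c).mpr hcm
        have h2 : PySem.List.index? (xs ++ [x]) c = none :=
          (PySem.List.index?_eq_none_iff (xs ++ [x]) c).mpr (by simp [hcm, hcx])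
        rw [h1, h2]
theorem pv_values_get (c : Char) :
    pvValues.get? c = (PySem.List.index? pvAlphabet c).map (fun n => (n : Int)) :=
  pv_build_get pvAlphabet (by decide) c

theorem pvGoB_nil (t w : Int) : pvGoB [] t w = some t := rfl

theorem pvGoB_cons (c : Char) (rest : List Char) (t w : Int) :
    pvGoB (c :: rest) t w
      = match pvValues.get? c with
        | none => none
        | some v => pvGoB rest (t + v * w) (w * 64) := rfl

theorem pv_goB_append (xs ys : List Char) (t w : Int) :
    pvGoB (xs ++ ys) t w
      = match pvGoB xs t w with
        | none => none
        | some t' => pvGoB ys t' (w * 64 ^ xs.length) := by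
  induction xs generalizing t w with
  | nil =>
    rw [List.nil_append, pvGoB_nil]
    dsimp only
    norm_num
  | cons c rest ih =>
    rw [List.cons_append, pvGoB_cons, pvGoB_cons]
    cases h : pvValues.get? c with
    | none => dsimp only
    | some v =>
      dsimp only
      rw [ih]
      have hw : w * 64 * 64 ^ rest.length = w * 64 ^ (rest.length + 1) := by ring
      rw [List.length_cons, hw]

theorem pv_main (cs : List Char) (acc : Int) :
    pvGoA cs acc = (pvGoB cs.reverse 0 1).map (fun v => acc * 64 ^ cs.length + v) := by
  induction cs generalizing acc with
  | nil =>
    rw [List.reverse_nil, pvGoB_nil]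
    dsimp only [Option.map_some]
    show some acc = _
    norm_num
  | cons c rest ih =>
    rw [List.reverse_cons, pv_goB_append, List.length_reverse]
    show (match PySem.List.index? pvAlphabet c with
          | none => none
          | some i => pvGoA rest (acc * 64 + (i : Int))) = _
    cases hidx : PySem.List.index? pvAlphabet c with
    | none =>
      have hv : pvValues.get? c = none := by rw [pv_values_get, hidx]; rfl
      dsimp only
      cases pvGoB rest.reverse 0 1 with
      | none => rfl
      | some t' =>
        dsimp only
        rw [pvGoB_cons, hv]
        rfl
    | some i =>
      have hv : pvValues.get? c = some (i : Int) := by rw [pv_values_get, hidx]; rfl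
      dsimp only
      rw [ih]
      cases pvGoB rest.reverse 0 1 with
      | none => rfl
      | some t' =>
        dsimp only
        rw [pvGoB_cons, hv]
        simp only [List.length_cons]
        exact congrArg some (by ring)

-- ===== VERDICT (by name: the statement is the Claim_ definition above) =====
theorem shortcode_to_media_id_spec : Claim_equal_shortcode_to_media_id := by
  intro s _
  unfold Spec_shortcode_to_media_id shortcode_to_media_id shortcode_to_media_id_alt
  rw [pv_main]
  cases pvGoB s.toList.reverse 0 1 with
  | none => rfl
  | some v => simp
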